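-- pv_equiv track=rewrite | github.com/MrBrantCode/unitest_baseline | mut_generate/mist_train_cf/cf_65691/solution.py | edgeLengthRestrictedPaths
-- ===== SOURCE A (Python) =====
-- def edgeLengthRestrictedPaths(n, edgeList, queries):
--     class UnionFind:
--         def __init__(self, n):
--             self.parent = list(range(n))
--             self.rank   = [0] * n
--
--         def find(self, x):
--             if x != self.parent[x]:
--                 self.parent[x] = self.find(self.parent[x])
--             return self.parent[x]
--
--         def union(self, x, y):
--             rx, ry = self.find(x), self.find(y)
--             if rx != ry:
--                 if self.rank[rx] > self.rank[ry]:
--                     self.parent[ry] = rx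
--                 else:
--                     self.parent[rx] = ry
--                     if self.rank[rx] == self.rank[ry]:
--                         self.rank[ry] += 1
--
--     edges = [(d, u, v) for u, v, d in edgeList]
--     edges.sort(reverse=True)
--
--     query_with_index = [(limit, p, q, i)
--                         for i, (p, q, limit) in enumerate(queries)]
--     query_with_index.sort(key=lambda t: t[0], reverse=True)
--
--     uf = UnionFind(n)
--     ans = [None] * len(queries)
--
--     pointer_edges = 0
--
--     for limit, p, q, i in query_with_index:
--         while pointer_edges < len(edges) and edges[pointer_edges][0] >= limit:
--             _, u, v = edges[pointer_edges]
--             uf.union(u, v)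
--             pointer_edges += 1
--         ans[i] = (uf.find(p) == uf.find(q))
--
--     return ans
-- ===== SOURCE B (Python) =====
-- def edgeLengthRestrictedPaths(n, edgeList, queries):
--     # Alternative: one descending-weight sweep over the edges that can matter,
--     # snapshotting a flat component-label array after each edge; each query is
--     # then answered independently from the snapshot taken after all edges with
--     # weight >= its limit, with no sorting or reordering of the queries.
--     if not queries:
--         return []
--     edges = sorted([(d, u, v) for u, v, d in edgeList], reverse=True)
--     min_limit = min(l for _, _, l in queries)
--     comp = list(range(n))
--     snaps = [comp]
--     for d, u, v in edges:
--         if d < min_limit: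
--             break
--         a, b = comp[u], comp[v]
--         if a != b:
--             comp = [a if c == b else c for c in comp]
--         snaps.append(comp)
--     ans = []
--     for p, q, limit in queries:
--         k = sum(1 for e in edges if e[0] >= limit)
--         c = snaps[k]
--         ans.append(c[p] == c[q])
--     return ans
-- ===== Notes on version B (the rewrite author's own statement) =====
-- stated objective: alternative
-- what changed: A sorts the queries and sweeps them offline through a union-find (path compression + union by rank); B never reorders the queries: it does one descending-weight sweep with a flat component-label array (relabelling on merge), snapshots the labelling after each edge, and answers every query independently by counting the edges whose weight reaches its limit and comparing the two labels in that snapshot.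
import Mathlib
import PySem

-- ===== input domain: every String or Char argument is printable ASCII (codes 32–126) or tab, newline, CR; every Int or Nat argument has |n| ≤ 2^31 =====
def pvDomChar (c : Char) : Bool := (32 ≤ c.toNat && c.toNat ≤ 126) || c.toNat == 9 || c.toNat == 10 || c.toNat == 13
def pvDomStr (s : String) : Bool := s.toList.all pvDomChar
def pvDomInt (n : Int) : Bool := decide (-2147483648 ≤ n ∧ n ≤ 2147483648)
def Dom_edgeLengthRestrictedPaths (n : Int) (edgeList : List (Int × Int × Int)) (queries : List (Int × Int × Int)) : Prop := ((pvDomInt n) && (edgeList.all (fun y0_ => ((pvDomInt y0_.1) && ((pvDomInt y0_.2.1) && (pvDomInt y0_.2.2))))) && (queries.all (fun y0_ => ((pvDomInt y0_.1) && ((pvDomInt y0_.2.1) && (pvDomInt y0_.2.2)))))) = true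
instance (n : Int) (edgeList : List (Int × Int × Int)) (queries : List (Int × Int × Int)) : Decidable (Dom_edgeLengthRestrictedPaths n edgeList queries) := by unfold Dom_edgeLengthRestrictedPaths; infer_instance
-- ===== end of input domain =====

-- B answers each query independently from a snapshot of a flat component-label array taken
-- during one descending-weight edge sweep; A is the offline sorted-query union-find sweep.
-- Equivalence of the RETURN value is what is proved (neither program mutates its arguments).

-- ===== PORT A =====
-- UnionFind.find with path compression; fuel = len(parent)+1 is a totality guard only,
-- never exhausted on inputs satisfying Pre_ (chains in the parent forest are shorter).
def pvFindA : Nat → List Int → Int → Int × List Int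
  | 0, parent, _ => (0, parent)
  | fuel + 1, parent, x =>
    let px := PySem.List.pyGetD parent x 0
    if x ≠ px then
      let res := pvFindA fuel parent px
      let p2 := PySem.List.pySetD res.2 x res.1
      (PySem.List.pyGetD p2 x 0, p2)
    else (px, parent)

-- UnionFind.union (union by rank)
def pvUnionA (parent rank : List Int) (x y : Int) : List Int × List Int :=
  let fx := pvFindA (parent.length + 1) parent x
  let fy := pvFindA (fx.2.length + 1) fx.2 y
  if fx.1 ≠ fy.1 then
    if PySem.List.pyGetD rank fx.1 0 > PySem.List.pyGetD rank fy.1 0 then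
      (PySem.List.pySetD fy.2 fy.1 fx.1, rank)
    else
      let p3 := PySem.List.pySetD fy.2 fx.1 fy.1
      if PySem.List.pyGetD rank fx.1 0 = PySem.List.pyGetD rank fy.1 0 then
        (p3, PySem.List.pySetD rank fy.1 (PySem.List.pyGetD rank fy.1 0 + 1))
      else (p3, rank)
  else (fy.2, rank)

-- the inner 'while pointer_edges < len(edges) and edges[pointer_edges][0] >= limit'
def pvWhileA (edges : List (Int × Int × Int)) (limit : Int) (parent rank : List Int) (ptr : Nat) : List Int × List Int × Nat :=
  match h : edges[ptr]? with
  | none => (parent, rank, ptr)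
  | some e =>
    if limit ≤ e.1 then
      let pr := pvUnionA parent rank e.2.1 e.2.2
      pvWhileA edges limit pr.1 pr.2 (ptr + 1)
    else (parent, rank, ptr)
  termination_by edges.length - ptr
  decreasing_by have hlt := (List.getElem?_eq_some_iff.mp h).1; omega

-- edges.sort(reverse=True) is ported as a stable sort on the weight (first component) only:
-- Python additionally tie-breaks equal-weight edges by (u, v), which never affects the returned
-- booleans (every edge of a given weight is processed before any query is answered from the state).
def edgeLengthRestrictedPaths (n : Int) (edgeList : List (Int × Int × Int)) (queries : List (Int × Int × Int)) : List Bool :=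
  let edges := PySem.List.sorted (edgeList.map (fun e => (e.2.2, e.1, e.2.1))) (fun t => t.1) true
  let qwi := PySem.List.sorted ((PySem.List.enumerate queries 0).map (fun t => (t.2.2.2, t.2.1, t.2.2.1, t.1))) (fun t => t.1) true
  let parent0 := PySem.List.pyRange 0 n 1
  let rank0 : List Int := List.replicate n.toNat 0
  -- ans = [None]*len(queries); every slot is written exactly once (the sorted list is a
  -- permutation of the enumerated indices), so the .getD false default is never read.
  let st := qwi.foldl (fun st t =>
      let w := pvWhileA edges t.1 st.1.1 st.1.2 st.2.2
      let fp := pvFindA (w.1.length + 1) w.1 t.2.1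
      let fq := pvFindA (fp.2.length + 1) fp.2 t.2.2.1
      ((fq.2, w.2.1), PySem.List.pySetD st.2.1 t.2.2.2 (some (fp.1 == fq.1)), w.2.2))
    ((parent0, rank0), (List.replicate queries.length (none : Option Bool), 0))
  st.2.1.map (fun o => o.getD false)

-- ===== PORT B =====
def pvMergeB (comp : List Int) (u v : Int) : List Int :=
  let a := PySem.List.pyGetD comp u 0
  let b := PySem.List.pyGetD comp v 0
  if a ≠ b then comp.map (fun c => if c = b then a else c) else comp

-- the snapshot sweep: process edges (already sorted by descending weight) until the first
-- edge below min_limit, keeping every intermediate labelling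
def pvSnapsB (minL : Int) : List Int → List (Int × Int × Int) → List (List Int)
  | comp, [] => [comp]
  | comp, e :: rest =>
    if e.1 < minL then [comp]
    else comp :: pvSnapsB minL (pvMergeB comp e.2.1 e.2.2) rest

-- same weight-descending stable sort as in port A (same Python sorted call; see the comment there)
def edgeLengthRestrictedPaths_alt (n : Int) (edgeList : List (Int × Int × Int)) (queries : List (Int × Int × Int)) : List Bool :=
  match queries with
  | [] => []
  | _ :: _ =>
    let edges := PySem.List.sorted (edgeList.map (fun e => (e.2.2, e.1, e.2.1))) (fun t => t.1) true
    -- min(l for _, _, l in queries); queries is nonempty here so min? is some and .getD 0 is never the default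
    let minL := (PySem.List.min? (queries.map (fun q => q.2.2)) (fun z => z)).getD 0
    let snaps := pvSnapsB minL (PySem.List.pyRange 0 n 1) edges
    queries.map (fun q =>
      let k := (edges.map (fun e => if q.2.2 ≤ e.1 then (1 : Int) else 0)).sum
      let c := PySem.List.pyGetD snaps k []
      PySem.List.pyGetD c q.1 0 == PySem.List.pyGetD c q.2.1 0)

-- ===== PRECONDITION & SPEC =====
-- Pre_ holds exactly where Python A returns normally: every query endpoint must be a valid
-- (possibly negative) index into the n-element parent list, and so must both endpoints of
-- every edge whose weight reaches at least one query's limit (only those edges are unioned).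
def Pre_edgeLengthRestrictedPaths (n : Int) (edgeList : List (Int × Int × Int)) (queries : List (Int × Int × Int)) : Prop :=
  (∀ q ∈ queries, PySem.Raise.InRange n.toNat q.1 ∧ PySem.Raise.InRange n.toNat q.2.1) ∧
  (∀ e ∈ edgeList, (∃ q ∈ queries, q.2.2 ≤ e.2.2) → PySem.Raise.InRange n.toNat e.1 ∧ PySem.Raise.InRange n.toNat e.2.1)
instance (n : Int) (edgeList : List (Int × Int × Int)) (queries : List (Int × Int × Int)) : Decidable (Pre_edgeLengthRestrictedPaths n edgeList queries) := by unfold Pre_edgeLengthRestrictedPaths; infer_instance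

def pvWitness_edgeLengthRestrictedPaths : Int × (List (Int × Int × Int)) × (List (Int × Int × Int)) :=
  (3, [(0, 1, 5), (1, 2, 3)], [(0, 2, 4), (0, 2, 3), (2, 2, 9)])

def Spec_edgeLengthRestrictedPaths (n : Int) (edgeList : List (Int × Int × Int)) (queries : List (Int × Int × Int)) (out : List Bool) : Prop := out = edgeLengthRestrictedPaths_alt n edgeList queries
instance (n : Int) (edgeList : List (Int × Int × Int)) (queries : List (Int × Int × Int)) (out : List Bool) : Decidable (Spec_edgeLengthRestrictedPaths n edgeList queries out) := by unfold Spec_edgeLengthRestrictedPaths; infer_instance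

-- ===== CLAIM (what is proved, stated in full; the proofs are below) =====
def Claim_equal_edgeLengthRestrictedPaths : Prop := ∀ (n : Int) (edgeList : List (Int × Int × Int)) (queries : List (Int × Int × Int)), Dom_edgeLengthRestrictedPaths n edgeList queries → Pre_edgeLengthRestrictedPaths n edgeList queries → Spec_edgeLengthRestrictedPaths n edgeList queries (edgeLengthRestrictedPaths n edgeList queries)

-- ===== LEMMAS AND PROOFS =====

-- Python's negative-index wraparound, normalised to a Nat index
def pvNrm (N : Nat) (x : Int) : Nat := if x < 0 then (x + N).toNat else x.toNat

-- one parent step (parent entries are always nonnegative)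
def pvStep (p : List Int) (i : Nat) : Nat := (p.getD i 0).toNat

def pvRootF : Nat → List Int → Nat → Nat
  | 0, _, i => i
  | f + 1, p, i => if pvStep p i = i then i else pvRootF f p (pvStep p i)

def pvRoot (N : Nat) (p : List Int) (i : Nat) : Nat := pvRootF N p i

def pvFixAt (p : List Int) (i : Nat) (f : Nat) : Prop := pvStep p (pvRootF f p i) = pvRootF f p i

def pvGood (N : Nat) (p : List Int) : Prop :=
  p.length = N ∧ (∀ i < N, 0 ≤ p.getD i 0 ∧ pvStep p i < N) ∧ (∀ i < N, ∃ f, pvFixAt p i f)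

def pvCnt (edges : List (Int × Int × Int)) (L : Int) : Nat := edges.countP (fun e => L ≤ e.1)

def pvCompSteps (comp0 : List Int) (edges : List (Int × Int × Int)) : List Int :=
  edges.foldl (fun c e => pvMergeB c e.2.1 e.2.2) comp0

def pvInv (N : Nat) (p comp : List Int) : Prop :=
  pvGood N p ∧ comp.length = N ∧
  ∀ i j, i < N → j < N → (pvRoot N p i = pvRoot N p j ↔ comp.getD i 0 = comp.getD j 0)

lemma pvRootF_fix (p : List Int) (i : Nat) (h : pvStep p i = i) : ∀ f, pvRootF f p i = i := by
  intro f; induction f with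
  | zero => rfl
  | succ f ih => simp [pvRootF, h]

lemma pvRootF_add (p : List Int) (a b i : Nat) : pvRootF (a + b) p i = pvRootF b p (pvRootF a p i) := by
  induction a generalizing i with
  | zero => simp [pvRootF]
  | succ a ih =>
    by_cases h : pvStep p i = i
    · simp [pvRootF, h, pvRootF_fix p i h]
    · have : a + 1 + b = (a + b) + 1 := by omega
      rw [this]
      simp only [pvRootF, h, if_neg h]
      exact ih (pvStep p i)

lemma pvFixAt_mono (p : List Int) (i f g : Nat) (hfg : f ≤ g) (h : pvFixAt p i f) :
    pvFixAt p i g ∧ pvRootF g p i = pvRootF f p i := by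
  have hg : g = f + (g - f) := by omega
  have he : pvRootF g p i = pvRootF f p i := by
    rw [hg, pvRootF_add]
    exact pvRootF_fix p _ h _
  exact ⟨by unfold pvFixAt; rw [he]; exact h, he⟩

lemma pvRootF_lt (N : Nat) (p : List Int) (hp : pvGood N p) (i : Nat) (hi : i < N) :
    ∀ f, pvRootF f p i < N := by
  intro f
  induction f generalizing i with
  | zero => exact hi
  | succ f ih =>
    by_cases h : pvStep p i = i
    · simpa [pvRootF, h] using hi
    · simp only [pvRootF, if_neg h]
      exact ih _ ((hp.2.1 i hi).2)

-- pigeonhole: under pvGood every chain reaches its root within N-1 steps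
lemma pvFixAt_pred (N : Nat) (p : List Int) (hp : pvGood N p) (i : Nat) (hi : i < N) :
    pvFixAt p i (N - 1) := by
  have hP : ∃ f, pvFixAt p i f := hp.2.2 i hi
  have hdec : DecidablePred (pvFixAt p i) := fun f => by unfold pvFixAt; infer_instance
  let k0 := @Nat.find _ hdec hP
  have hspec : pvFixAt p i k0 := @Nat.find_spec _ hdec hP
  have hk : k0 ≤ N - 1 := by
    rcases Nat.le_total k0 (N - 1) with hok | hge
    · exact hok
    rcases Nat.eq_or_lt_of_le hge with he | hgt
    · omega
    exfalso
    have hmap : ∀ a : Fin (N + 1), pvRootF a p i < N := fun a => pvRootF_lt N p hp i hi a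
    have hninj : ¬ Function.Injective (fun a : Fin (N + 1) => (⟨pvRootF a p i, hmap a⟩ : Fin N)) := by
      intro hinj
      have := Fintype.card_le_of_injective _ hinj
      simp at this
    rw [Function.not_injective_iff] at hninj
    obtain ⟨a, b, hab, hne⟩ := hninj
    have hab' : pvRootF a p i = pvRootF b p i := by
      simpa using congrArg Fin.val hab
    -- wlog a < b
    rcases Nat.lt_or_ge a.val b.val with hlt | hge
    · have hkey : pvFixAt p i (a.val + (k0 - b.val)) := by
        unfold pvFixAt
        have h1 : pvRootF (a.val + (k0 - b.val)) p i = pvRootF k0 p i := by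
          rw [pvRootF_add, hab', ← pvRootF_add]
          congr 1
          omega
        rw [h1]; exact hspec
      have := @Nat.find_min _ hdec hP _ (show a.val + (k0 - b.val) < k0 by
        have hb : b.val < N + 1 := b.2
        omega)
      exact this hkey
    · have hlt : b.val < a.val := by
        rcases Nat.eq_or_lt_of_le hge with he | hl
        · exact absurd (Fin.ext he.symm) hne
        · exact hl
      have hkey : pvFixAt p i (b.val + (k0 - a.val)) := by
        unfold pvFixAt
        have h1 : pvRootF (b.val + (k0 - a.val)) p i = pvRootF k0 p i := by
          rw [pvRootF_add, ← hab', ← pvRootF_add]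
          congr 1
          omega
        rw [h1]; exact hspec
      have := @Nat.find_min _ hdec hP _ (show b.val + (k0 - a.val) < k0 by
        have hb : a.val < N + 1 := a.2
        omega)
      exact this hkey
  exact (pvFixAt_mono p i k0 (N - 1) hk hspec).1

lemma pvFixAt_N (N : Nat) (p : List Int) (hp : pvGood N p) (i : Nat) (hi : i < N) :
    pvFixAt p i N :=
  (pvFixAt_mono p i (N - 1) N (by omega) (pvFixAt_pred N p hp i hi)).1

lemma pvRoot_eq_of_reach (N : Nat) (p : List Int) (hp : pvGood N p) (i r f : Nat) (hi : i < N)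
    (hr : pvRootF f p i = r) (hfix : pvStep p r = r) : pvRoot N p i = r := by
  have h1 : pvRootF (f + N) p i = r := by
    rw [pvRootF_add, hr]
    exact pvRootF_fix p r hfix N
  have h2 : pvRootF (N + f) p i = pvRootF N p i := by
    rw [pvRootF_add]
    exact pvRootF_fix p _ (pvFixAt_N N p hp i hi) f
  have : f + N = N + f := by omega
  rw [this, h2] at h1
  exact h1

lemma pvRoot_fix (N : Nat) (p : List Int) (hp : pvGood N p) (i : Nat) (hi : i < N) :
    pvStep p (pvRoot N p i) = pvRoot N p i := pvFixAt_N N p hp i hi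

lemma pvRoot_lt (N : Nat) (p : List Int) (hp : pvGood N p) (i : Nat) (hi : i < N) :
    pvRoot N p i < N := pvRootF_lt N p hp i hi N

lemma pvRoot_step (N : Nat) (p : List Int) (hp : pvGood N p) (i : Nat) (hi : i < N)
    (h : pvStep p i ≠ i) : pvRoot N p (pvStep p i) = pvRoot N p i := by
  have h1 : pvRootF (1 + N) p i = pvRootF N p (pvStep p i) := by
    rw [pvRootF_add]
    simp [pvRootF, h]
  have h2 : pvRootF (1 + N) p i = pvRootF N p i :=
    (pvFixAt_mono p i N (1 + N) (by omega) (pvFixAt_N N p hp i hi)).2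
  unfold pvRoot
  rw [← h1, h2]

lemma pvRoot_of_fix (N : Nat) (p : List Int) (hp : pvGood N p) (i : Nat) (hi : i < N)
    (h : pvStep p i = i) : pvRoot N p i = i := by
  simpa using pvRootF_fix p i h N

-- the one-write lemma: set a ← v where v is a fixpoint, covering both path compression
-- (v = root of a) and root linking (a itself a root)
lemma pvSet (N : Nat) (p : List Int) (hp : pvGood N p) (a v : Nat) (ha : a < N) (hv : v < N)
    (hfixv : pvStep p v = v) (hva : v ≠ a)
    (hcase : pvRoot N p a = a ∨ v = pvRoot N p a) :
    pvGood N (p.set a (v : Int)) ∧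
    ∀ i, i < N → pvRoot N (p.set a (v : Int)) i =
      if pvRoot N p i = pvRoot N p a then v else pvRoot N p i := by
  obtain ⟨hlen, hrange, hreach⟩ := hp
  set p' := p.set a (v : Int) with hp'
  have hlen' : p'.length = N := by simp [hp', hlen]
  have hgetD : ∀ j, j < N → p'.getD j 0 = if j = a then (v : Int) else p.getD j 0 := by
    intro j hj
    have hjp : j < p.length := by omega
    rw [hp', List.getD_eq_getElem _ 0 (by simp [hlen]; omega), List.getElem_set,
        List.getD_eq_getElem p 0 hjp]
    by_cases h : j = a
    · simp [h]
    · rw [if_neg h, if_neg (fun hh : a = j => h hh.symm)]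
  have hstep' : ∀ j, j < N → pvStep p' j = if j = a then v else pvStep p j := by
    intro j hj
    unfold pvStep
    rw [hgetD j hj]
    by_cases h : j = a <;> simp [h, pvStep]
  set T : Nat → Nat := fun i => if pvRoot N p i = pvRoot N p a then v else pvRoot N p i with hT
  have hTlt : ∀ i, i < N → T i < N := by
    intro i hi
    simp only [hT]
    split
    · exact hv
    · exact pvRoot_lt N p ⟨hlen, hrange, hreach⟩ i hi
  have hfixT : ∀ i, i < N → pvStep p' (T i) = T i := by
    intro i hi
    simp only [hT]
    split
    case isTrue hc =>
      rw [hstep' v hv, if_neg hva]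
      exact hfixv
    case isFalse hc =>
      have hrfix : pvStep p (pvRoot N p i) = pvRoot N p i := pvRoot_fix N p ⟨hlen, hrange, hreach⟩ i hi
      have hrlt : pvRoot N p i < N := pvRoot_lt N p ⟨hlen, hrange, hreach⟩ i hi
      have hra : pvRoot N p i ≠ a := by
        intro he
        apply hc
        have h2 : pvRoot N p a = a :=
          pvRoot_of_fix N p ⟨hlen, hrange, hreach⟩ a ha (he ▸ hrfix)
        rw [h2, ← he]
      rw [hstep' _ hrlt, if_neg hra]
      exact hrfix
  -- the fixpoint case, shared by both branches of the induction below
  have hfixcase : ∀ i, i < N → pvStep p i = i → ∃ g, pvRootF g p' i = T i := by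
    intro i hi hifix
    have hroot : pvRoot N p i = i := pvRoot_of_fix N p ⟨hlen, hrange, hreach⟩ i hi hifix
    by_cases hia : i = a
    · have hroota : pvRoot N p i = pvRoot N p a := by rw [hia]
      have hTi : T i = v := by simp only [hT]; rw [if_pos hroota]
      have hsv : pvStep p' i = v := by rw [hstep' i hi, if_pos hia]
      have hne : pvStep p' i ≠ i := by rw [hsv]; intro h; exact hva (h.trans hia)
      refine ⟨1, ?_⟩
      rw [hTi]
      unfold pvRootF
      rw [if_neg hne]
      exact hsv
    · by_cases hir : i = pvRoot N p a
      · have hvi : v = i := by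
          rcases hcase with hc1 | hc2
          · exact absurd (hir.trans hc1) hia
          · rw [hc2, ← hir]
        refine ⟨0, ?_⟩
        simp only [pvRootF, hT]
        rw [if_pos (hroot.trans hir)]
        exact hvi.symm
      · refine ⟨0, ?_⟩
        simp only [pvRootF, hT]
        rw [if_neg (fun h => hir (hroot.symm.trans h)), hroot]
  have haux : ∀ f i, i < N → pvFixAt p i f → ∃ g, pvRootF g p' i = T i := by
    intro f
    induction f with
    | zero => exact fun i hi hfx => hfixcase i hi hfx
    | succ f ih =>
      intro i hi hfx
      by_cases hifix : pvStep p i = i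
      · exact hfixcase i hi hifix
      · have hjlt : pvStep p i < N := (hrange i hi).2
        have hfxj : pvFixAt p (pvStep p i) f := by
          unfold pvFixAt at hfx ⊢
          simpa [pvRootF, hifix] using hfx
        have heqr : pvRoot N p (pvStep p i) = pvRoot N p i :=
          pvRoot_step N p ⟨hlen, hrange, hreach⟩ i hi hifix
        by_cases hia : i = a
        · have hroota : pvRoot N p i = pvRoot N p a := by rw [hia]
          have hTi : T i = v := by simp only [hT]; rw [if_pos hroota]
          have hsv : pvStep p' i = v := by rw [hstep' i hi, if_pos hia]
          have hne : pvStep p' i ≠ i := by rw [hsv]; intro h; exact hva (h.trans hia)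
          refine ⟨1, ?_⟩
          rw [hTi]
          unfold pvRootF
          rw [if_neg hne]
          exact hsv
        · obtain ⟨g, hg⟩ := ih (pvStep p i) hjlt hfxj
          refine ⟨1 + g, ?_⟩
          have hsv : pvStep p' i = pvStep p i := by rw [hstep' i hi, if_neg hia]
          have hne : pvStep p' i ≠ i := by rw [hsv]; exact hifix
          have hTij : T i = T (pvStep p i) := by simp only [hT, heqr]
          rw [pvRootF_add]
          have h1 : pvRootF 1 p' i = pvStep p i := by
            unfold pvRootF
            rw [if_neg hne]
            exact hsv
          rw [h1, hg, ← hTij]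
  have hgood' : pvGood N p' := by
    refine ⟨hlen', ?_, ?_⟩
    · intro i hi
      constructor
      · rw [hgetD i hi]
        split
        · exact Int.natCast_nonneg v
        · exact (hrange i hi).1
      · rw [hstep' i hi]
        split
        · exact hv
        · exact (hrange i hi).2
    · intro i hi
      obtain ⟨f, hf⟩ := hreach i hi
      obtain ⟨g, hg⟩ := haux f i hi hf
      refine ⟨g, ?_⟩
      unfold pvFixAt
      rw [hg]
      exact hfixT i hi
  refine ⟨hgood', ?_⟩
  intro i hi
  obtain ⟨f, hf⟩ := hreach i hi
  obtain ⟨g, hg⟩ := haux f i hi hf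
  exact pvRoot_eq_of_reach N p' hgood' i (T i) g hi hg (hfixT i hi)

-- reading / writing through Python indices
lemma pvIdx_nrm (N : Nat) (x : Int) (hx : PySem.Raise.InRange N x) :
    PySem.List.pyIdx? N x = some (pvNrm N x) := by
  obtain ⟨h1, h2⟩ := hx
  unfold PySem.List.pyIdx? pvNrm
  by_cases h0 : 0 ≤ x
  · rw [if_pos h0, if_pos h2, if_neg (by omega : ¬ x < 0)]
  · rw [if_neg h0, if_pos h1, if_pos (by omega : x < 0)]
    congr 1
    omega

lemma pvNrm_lt (N : Nat) (x : Int) (hx : PySem.Raise.InRange N x) : pvNrm N x < N := by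
  obtain ⟨h1, h2⟩ := hx
  unfold pvNrm
  split_ifs <;> omega

lemma pvGetD_nrm (N : Nat) (xs : List Int) (x : Int) (d : Int) (hlen : xs.length = N)
    (hx : PySem.Raise.InRange N x) : PySem.List.pyGetD xs x d = xs.getD (pvNrm N x) d := by
  unfold PySem.List.pyGetD PySem.List.pyGet?
  rw [hlen, pvIdx_nrm N x hx]
  simp [List.getD_eq_getElem?_getD]

lemma pvSetD_nrm (N : Nat) (xs : List Int) (x v : Int) (hlen : xs.length = N)
    (hx : PySem.Raise.InRange N x) : PySem.List.pySetD xs x v = xs.set (pvNrm N x) v := by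
  unfold PySem.List.pySetD PySem.List.pySet?
  rw [hlen, pvIdx_nrm N x hx]
  rfl

lemma pvGetD_self_int (N : Nat) (p : List Int) (hp : pvGood N p) (j : Nat) (hj : j < N)
    (hfix : pvStep p j = j) : p.getD j 0 = (j : Int) := by
  have h0 := (hp.2.1 j hj).1
  unfold pvStep at hfix
  omega

-- find on an argument that is (the Int of) a root returns immediately
lemma pvFindA_fix (N : Nat) (p : List Int) (hp : pvGood N p) (j : Nat) (hj : j < N)
    (hfix : pvStep p j = j) (f : Nat) : pvFindA (f + 1) p ((j : Nat) : Int) = (((j : Nat) : Int), p) := by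
  have hlen : p.length = N := hp.1
  have hin : PySem.Raise.InRange N ((j : Nat) : Int) := ⟨by omega, by exact_mod_cast hj⟩
  have hnrm : pvNrm N ((j : Nat) : Int) = j := by unfold pvNrm; simp
  have hpx : PySem.List.pyGetD p ((j : Nat) : Int) 0 = ((j : Nat) : Int) := by
    rw [pvGetD_nrm N p _ 0 hlen hin, hnrm]
    exact pvGetD_self_int N p hp j hj hfix
  show (let px := PySem.List.pyGetD p ((j : Nat) : Int) 0;
        if ((j : Nat) : Int) ≠ px then
          let res := pvFindA f p px
          let p2 := PySem.List.pySetD res.2 ((j : Nat) : Int) res.1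
          (PySem.List.pyGetD p2 ((j : Nat) : Int) 0, p2)
        else (px, p)) = (((j : Nat) : Int), p)
  rw [hpx]
  simp

lemma pvSet_self (p : List Int) (j : Nat) (hj : j < p.length) (hv : p.getD j 0 = v) :
    p.set j v = p := by
  apply List.ext_getElem
  · simp
  · intro k h1 h2
    rw [List.getElem_set]
    split
    case isTrue h =>
      subst h
      rw [List.getD_eq_getElem p 0 hj] at hv
      exact hv.symm
    case isFalse h => rfl

-- find: returns the root (as the Int stored in the list) and compresses without changing roots
lemma pvFindA_ok (N : Nat) : ∀ fuel p x, pvGood N p → PySem.Raise.InRange N x →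
    pvFixAt p (pvNrm N x) fuel →
    (pvFindA (fuel + 2) p x).1 = ((pvRoot N p (pvNrm N x) : Nat) : Int) ∧
    pvGood N (pvFindA (fuel + 2) p x).2 ∧
    ∀ i, i < N → pvRoot N (pvFindA (fuel + 2) p x).2 i = pvRoot N p i := by
  intro fuel
  induction fuel with
  | zero =>
    intro p x hp hx hfx
    -- pvFixAt _ _ 0 : x's node is already a root
    have hnx : pvNrm N x < N := pvNrm_lt N x hx
    have hfix : pvStep p (pvNrm N x) = pvNrm N x := hfx
    have hroot : pvRoot N p (pvNrm N x) = pvNrm N x := pvRoot_of_fix N p hp _ hnx hfix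
    have hpx : PySem.List.pyGetD p x 0 = ((pvNrm N x : Nat) : Int) := by
      rw [pvGetD_nrm N p x 0 hp.1 hx]
      exact pvGetD_self_int N p hp _ hnx hfix
    by_cases hxe : x = ((pvNrm N x : Nat) : Int)
    · -- x nonnegative: the else branch returns immediately
      have : pvFindA 2 p x = (((pvNrm N x : Nat) : Int), p) := by
        rw [hxe]
        exact pvFindA_fix N p hp _ hnx hfix 1
      rw [this, hroot]
      exact ⟨rfl, hp, fun i _ => rfl⟩
    · -- x negative: one recursive call on the (root) value, then a no-op write
      have hstep : pvFindA 2 p x =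
          (let px := PySem.List.pyGetD p x 0;
           if x ≠ px then
             let res := pvFindA 1 p px
             let p2 := PySem.List.pySetD res.2 x res.1
             (PySem.List.pyGetD p2 x 0, p2)
           else (px, p)) := rfl
      rw [hstep, hpx, if_pos hxe, pvFindA_fix N p hp _ hnx hfix 0]
      have hset : PySem.List.pySetD p x ((pvNrm N x : Nat) : Int) = p := by
        rw [pvSetD_nrm N p x _ hp.1 hx]
        exact pvSet_self p (pvNrm N x) (by rw [hp.1]; exact hnx) (pvGetD_self_int N p hp _ hnx hfix)
      simp [hset, hpx, hroot, hp]
  | succ fuel ih =>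
    intro p x hp hx hfx
    have hnx : pvNrm N x < N := pvNrm_lt N x hx
    by_cases hfix : pvStep p (pvNrm N x) = pvNrm N x
    · -- root case again, with more fuel
      have hroot : pvRoot N p (pvNrm N x) = pvNrm N x := pvRoot_of_fix N p hp _ hnx hfix
      have hpx : PySem.List.pyGetD p x 0 = ((pvNrm N x : Nat) : Int) := by
        rw [pvGetD_nrm N p x 0 hp.1 hx]
        exact pvGetD_self_int N p hp _ hnx hfix
      by_cases hxe : x = ((pvNrm N x : Nat) : Int)
      · have : pvFindA (fuel + 3) p x = (((pvNrm N x : Nat) : Int), p) := by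
          rw [hxe]
          exact pvFindA_fix N p hp _ hnx hfix (fuel + 2)
        rw [show fuel + 1 + 2 = fuel + 3 by omega, this, hroot]
        simp [hp]
      · have hstep : pvFindA (fuel + 3) p x =
            (let px := PySem.List.pyGetD p x 0;
             if x ≠ px then
               let res := pvFindA (fuel + 2) p px
               let p2 := PySem.List.pySetD res.2 x res.1
               (PySem.List.pyGetD p2 x 0, p2)
             else (px, p)) := rfl
        rw [show fuel + 1 + 2 = fuel + 3 by omega, hstep, hpx, if_pos hxe,
            pvFindA_fix N p hp _ hnx hfix (fuel + 1)]
        have hset : PySem.List.pySetD p x ((pvNrm N x : Nat) : Int) = p := by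
          rw [pvSetD_nrm N p x _ hp.1 hx]
          exact pvSet_self p (pvNrm N x) (by rw [hp.1]; exact hnx) (pvGetD_self_int N p hp _ hnx hfix)
        simp [hset, hpx, hroot, hp]
    · -- interior node: recurse on the parent, then compress
      have hrange := hp.2.1 _ hnx
      set px := p.getD (pvNrm N x) 0 with hpxdef
      have hpxval : PySem.List.pyGetD p x 0 = px := pvGetD_nrm N p x 0 hp.1 hx
      have hpxnn : 0 ≤ px := hrange.1
      have hnpx : pvNrm N px = pvStep p (pvNrm N x) := by
        unfold pvStep
        rw [← hpxdef]
        unfold pvNrm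
        rw [if_neg (by omega)]
      have hpxlt : pvStep p (pvNrm N x) < N := hrange.2
      have hinpx : PySem.Raise.InRange N px := by
        unfold PySem.Raise.InRange
        unfold pvStep at hpxlt
        omega
      have hxne : x ≠ px := by
        intro he
        apply hfix
        have : pvNrm N x = pvNrm N px := by rw [he]
        rw [← hnpx, ← this]
      have hfxpx : pvFixAt p (pvNrm N px) fuel := by
        rw [hnpx]
        unfold pvFixAt at hfx ⊢
        simpa [pvRootF, hfix] using hfx
      obtain ⟨ih1, ih2, ih3⟩ := ih p px hp hinpx hfxpx
      set p1 := (pvFindA (fuel + 2) p px).2 with hp1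
      have hrooteq : pvRoot N p (pvNrm N px) = pvRoot N p (pvNrm N x) := by
        rw [hnpx]
        exact pvRoot_step N p hp _ hnx hfix
      set rt := pvRoot N p (pvNrm N x) with hrt
      have hrtlt : rt < N := pvRoot_lt N p hp _ hnx
      have hrtne : rt ≠ pvNrm N x := by
        intro he
        apply hfix
        have := pvRoot_fix N p hp _ hnx
        rw [← hrt, he] at this
        exact this
      have hrootp1 : pvRoot N p1 (pvNrm N x) = rt := by rw [ih3 _ hnx]
      have hfixp1 : pvStep p1 rt = rt := by
        have := pvRoot_fix N p1 ih2 _ hnx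
        rw [hrootp1] at this
        exact this
      have hsetlem := pvSet N p1 ih2 (pvNrm N x) rt hnx hrtlt hfixp1 hrtne
        (Or.inr hrootp1.symm)
      have hstep : pvFindA (fuel + 1 + 2) p x =
          (let pxv := PySem.List.pyGetD p x 0;
           if x ≠ pxv then
             let res := pvFindA (fuel + 2) p pxv
             let p2 := PySem.List.pySetD res.2 x res.1
             (PySem.List.pyGetD p2 x 0, p2)
           else (pxv, p)) := rfl
      rw [hstep, hpxval, if_pos hxne]
      simp only [← hp1, ih1, hrooteq, ← hrt]
      have hsetD : PySem.List.pySetD p1 x ((rt : Nat) : Int) = p1.set (pvNrm N x) ((rt : Nat) : Int) :=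
        pvSetD_nrm N p1 x _ ih2.1 hx
      rw [hsetD]
      set p2 := p1.set (pvNrm N x) ((rt : Nat) : Int) with hp2
      have hgood2 : pvGood N p2 := hsetlem.1
      have hroots2 : ∀ i, i < N → pvRoot N p2 i = pvRoot N p1 i := by
        intro i hi
        rw [hsetlem.2 i hi]
        split
        case isTrue h => rw [h, hrootp1]
        case isFalse h => rfl
      have hval : PySem.List.pyGetD p2 x 0 = ((rt : Nat) : Int) := by
        rw [pvGetD_nrm N p2 x 0 hgood2.1 hx, hp2,
            List.getD_eq_getElem _ 0 (by rw [List.length_set, ih2.1]; exact hnx), List.getElem_set]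
        simp
      refine ⟨hval, hgood2, ?_⟩
      intro i hi
      rw [hroots2 i hi, ih3 i hi]

lemma pvNrm_natCast (N k : Nat) : pvNrm N ((k : Nat) : Int) = k := by
  unfold pvNrm
  simp

lemma pvInRange_natCast (N k : Nat) (hk : k < N) : PySem.Raise.InRange N ((k : Nat) : Int) := by
  unfold PySem.Raise.InRange
  omega

-- find with the fuel the port passes (len(parent)+1)
lemma pvFindA_port (N : Nat) (p : List Int) (x : Int) (hp : pvGood N p)
    (hx : PySem.Raise.InRange N x) :
    (pvFindA (p.length + 1) p x).1 = ((pvRoot N p (pvNrm N x) : Nat) : Int) ∧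
    pvGood N (pvFindA (p.length + 1) p x).2 ∧
    ∀ i, i < N → pvRoot N (pvFindA (p.length + 1) p x).2 i = pvRoot N p i := by
  have hN : 0 < N := by
    obtain ⟨h1, h2⟩ := hx
    omega
  rw [show p.length + 1 = (N - 1) + 2 by rw [hp.1]; omega]
  exact pvFindA_ok N (N - 1) p x hp hx (pvFixAt_pred N p hp _ (pvNrm_lt N x hx))

lemma pvMergeB_getD (N : Nat) (comp : List Int) (x y : Int) (hlen : comp.length = N)
    (hx : PySem.Raise.InRange N x) (hy : PySem.Raise.InRange N y) (i : Nat) (hi : i < N) :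
    (pvMergeB comp x y).getD i 0 =
      (if comp.getD i 0 = comp.getD (pvNrm N y) 0 then comp.getD (pvNrm N x) 0
       else comp.getD i 0) ∨
    ((pvMergeB comp x y) = comp ∧ comp.getD (pvNrm N x) 0 = comp.getD (pvNrm N y) 0) := by
  simp only [pvMergeB]
  rw [pvGetD_nrm N comp x 0 hlen hx, pvGetD_nrm N comp y 0 hlen hy]
  by_cases h : comp.getD (pvNrm N x) 0 = comp.getD (pvNrm N y) 0
  · right
    exact ⟨by rw [if_neg (not_not_intro h)], h⟩
  · left
    rw [if_pos h]
    have hil : i < comp.length := by omega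
    rw [List.getD_eq_getElem _ 0 (by simp [hil]), List.getElem_map,
        List.getD_eq_getElem comp 0 hil]

lemma pvMergeB_length (comp : List Int) (x y : Int) :
    (pvMergeB comp x y).length = comp.length := by
  simp only [pvMergeB]
  split <;> simp

-- union: the partition merges the classes of x and y, exactly as B's relabelling does
lemma pvUnionA_ok (N : Nat) (p rank comp : List Int) (x y : Int)
    (hinv : pvInv N p comp) (hx : PySem.Raise.InRange N x) (hy : PySem.Raise.InRange N y) :
    pvInv N (pvUnionA p rank x y).1 (pvMergeB comp x y) := by
  obtain ⟨hgood, hclen, hrel⟩ := hinv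
  have hnx : pvNrm N x < N := pvNrm_lt N x hx
  have hny : pvNrm N y < N := pvNrm_lt N y hy
  obtain ⟨hf1, hg1, hr1⟩ := pvFindA_port N p x hgood hx
  set p1 := (pvFindA (p.length + 1) p x).2 with hp1
  obtain ⟨hf2, hg2, hr2⟩ := pvFindA_port N p1 y hg1 hy
  set p2 := (pvFindA (p1.length + 1) p1 y).2 with hp2
  set rx := pvRoot N p (pvNrm N x) with hrx
  set ry := pvRoot N p (pvNrm N y) with hry
  have hf2' : (pvFindA (p1.length + 1) p1 y).1 = ((ry : Nat) : Int) := by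
    rw [hf2, hr1 _ hny]
  have hr2' : ∀ i, i < N → pvRoot N p2 i = pvRoot N p i := by
    intro i hi
    rw [hr2 i hi, hr1 i hi]
  have hrxlt : rx < N := pvRoot_lt N p hgood _ hnx
  have hrylt : ry < N := pvRoot_lt N p hgood _ hny
  have hrxfix : pvStep p rx = rx := pvRoot_fix N p hgood _ hnx
  have hryfix : pvStep p ry = ry := pvRoot_fix N p hgood _ hny
  have hrootrx : pvRoot N p rx = rx := pvRoot_of_fix N p hgood _ hrxlt hrxfix
  have hrootry : pvRoot N p ry = ry := pvRoot_of_fix N p hgood _ hrylt hryfix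
  -- comp-side labels
  set a := comp.getD (pvNrm N x) 0 with ha
  set b := comp.getD (pvNrm N y) 0 with hb
  have hiffa : ∀ i, i < N → (pvRoot N p i = rx ↔ comp.getD i 0 = a) := fun i hi => hrel i _ hi hnx
  have hiffb : ∀ i, i < N → (pvRoot N p i = ry ↔ comp.getD i 0 = b) := fun i hi => hrel i _ hi hny
  have hab : rx = ry ↔ a = b := hrel _ _ hnx hny
  have hunion : pvUnionA p rank x y =
      (if ((rx : Nat) : Int) ≠ ((ry : Nat) : Int) then
        if PySem.List.pyGetD rank ((rx : Nat) : Int) 0 > PySem.List.pyGetD rank ((ry : Nat) : Int) 0 then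
          (PySem.List.pySetD p2 ((ry : Nat) : Int) ((rx : Nat) : Int), rank)
        else
          let p3 := PySem.List.pySetD p2 ((rx : Nat) : Int) ((ry : Nat) : Int)
          if PySem.List.pyGetD rank ((rx : Nat) : Int) 0 = PySem.List.pyGetD rank ((ry : Nat) : Int) 0 then
            (p3, PySem.List.pySetD rank ((ry : Nat) : Int) (PySem.List.pyGetD rank ((ry : Nat) : Int) 0 + 1))
          else (p3, rank)
      else (p2, rank)) := by
    simp only [pvUnionA]
    rw [← hp1, ← hp2, hf1, hf2']
  by_cases heq : rx = ry
  · -- same class: nothing changes on either side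
    have hmeq : pvMergeB comp x y = comp := by
      simp only [pvMergeB]
      rw [pvGetD_nrm N comp x 0 hclen hx, pvGetD_nrm N comp y 0 hclen hy, ← ha, ← hb,
          if_neg (not_not_intro (hab.mp heq))]
    rw [hunion, if_neg (by simp [heq]), hmeq]
    exact ⟨hg2, hclen, fun i j hi hj => by rw [hr2' i hi, hr2' j hj]; exact hrel i j hi hj⟩
  · have hne : ((rx : Nat) : Int) ≠ ((ry : Nat) : Int) := by exact_mod_cast heq
    have habne : a ≠ b := fun h => heq (hab.mpr h)
    -- B's relabelling
    have hm : ∀ i, i < N → (pvMergeB comp x y).getD i 0 = (if comp.getD i 0 = b then a else comp.getD i 0) := by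
      intro i hi
      rcases pvMergeB_getD N comp x y hclen hx hy i hi with h | ⟨_, hcontra⟩
      · exact h
      · exact absurd hcontra habne
    have hmlen : (pvMergeB comp x y).length = N := by rw [pvMergeB_length, hclen]
    -- the two possible links give the same partition
    have main : ∀ p' : List Int, pvGood N p' →
        ((∀ i, i < N → pvRoot N p' i = if pvRoot N p i = ry then rx else pvRoot N p i) ∨
         (∀ i, i < N → pvRoot N p' i = if pvRoot N p i = rx then ry else pvRoot N p i)) →
        pvInv N p' (pvMergeB comp x y) := by
      intro p' hg' hcases
      refine ⟨hg', hmlen, ?_⟩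
      intro i j hi hj
      rw [hm i hi, hm j hj]
      have hbase := hrel i j hi hj
      have hia := hiffa i hi
      have hib := hiffb i hi
      have hja := hiffa j hj
      have hjb := hiffb j hj
      rcases hcases with hc | hc
      · rw [hc i hi, hc j hj]
        by_cases h1 : pvRoot N p i = ry <;> by_cases h2 : pvRoot N p j = ry
        · rw [if_pos h1, if_pos h2, if_pos (hib.mp h1), if_pos (hjb.mp h2)]
          simp
        · rw [if_pos h1, if_neg h2, if_pos (hib.mp h1), if_neg (fun h => h2 (hjb.mpr h))]
          constructor
          · intro h
            exact (hja.mp h.symm).symm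
          · intro h
            exact (hja.mpr h.symm).symm
        · rw [if_neg h1, if_pos h2, if_neg (fun h => h1 (hib.mpr h)), if_pos (hjb.mp h2)]
          constructor
          · intro h
            exact hia.mp h
          · intro h
            exact hia.mpr h
        · rw [if_neg h1, if_neg h2, if_neg (fun h => h1 (hib.mpr h)), if_neg (fun h => h2 (hjb.mpr h))]
          exact hbase
      · rw [hc i hi, hc j hj]
        by_cases h1 : pvRoot N p i = rx <;> by_cases h2 : pvRoot N p j = rx
        · rw [if_pos h1, if_pos h2,
              if_neg (fun h => habne ((hia.mp h1).symm.trans h)),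
              if_neg (fun h => habne ((hja.mp h2).symm.trans h)),
              hia.mp h1, hja.mp h2]
          simp
        · rw [if_pos h1, if_neg h2, if_neg (fun h => habne ((hia.mp h1).symm.trans h)), hia.mp h1]
          by_cases h3 : comp.getD j 0 = b
          · rw [if_pos h3]
            constructor
            · intro _
              rfl
            · intro _
              exact (hjb.mpr h3).symm
          · rw [if_neg h3]
            constructor
            · intro h
              exact absurd (hjb.mp h.symm) h3
            · intro h
              exact absurd (hja.mpr h.symm) h2
        · rw [if_neg h1, if_pos h2, if_neg (fun h => habne ((hja.mp h2).symm.trans h)), hja.mp h2]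
          by_cases h3 : comp.getD i 0 = b
          · rw [if_pos h3]
            constructor
            · intro _
              exact rfl
            · intro _
              exact hib.mpr h3
          · rw [if_neg h3]
            constructor
            · intro h
              exact absurd (hib.mp h) h3
            · intro h
              exact absurd (hia.mpr h) h1
        · rw [if_neg h1, if_neg h2]
          by_cases h3 : comp.getD i 0 = b <;> by_cases h4 : comp.getD j 0 = b
          · rw [if_pos h3, if_pos h4]
            constructor
            · intro _
              rfl
            · intro _
              rw [hib.mpr h3, hjb.mpr h4]
          · rw [if_pos h3, if_neg h4]
            constructor
            · intro h
              rw [hib.mpr h3] at h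
              exact absurd (hjb.mp h.symm) h4
            · intro h
              exact absurd (hja.mpr h.symm) h2
          · rw [if_neg h3, if_pos h4]
            constructor
            · intro h
              rw [hjb.mpr h4] at h
              exact absurd (hib.mp h) h3
            · intro h
              exact absurd (hia.mpr h) h1
          · rw [if_neg h3, if_neg h4]
            exact hbase
    -- now the two branches of union-by-rank
    have hfixrx2 : pvStep p2 rx = rx := by
      have h := pvRoot_fix N p2 hg2 rx hrxlt
      rwa [hr2' rx hrxlt, hrootrx] at h
    have hfixry2 : pvStep p2 ry = ry := by
      have h := pvRoot_fix N p2 hg2 ry hrylt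
      rwa [hr2' ry hrylt, hrootry] at h
    have hrootrx2 : pvRoot N p2 rx = rx := by rw [hr2' rx hrxlt, hrootrx]
    have hrootry2 : pvRoot N p2 ry = ry := by rw [hr2' ry hrylt, hrootry]
    rw [hunion, if_pos hne]
    by_cases hrk : PySem.List.pyGetD rank ((rx : Nat) : Int) 0 > PySem.List.pyGetD rank ((ry : Nat) : Int) 0
    · rw [if_pos hrk]
      have hsetD : PySem.List.pySetD p2 ((ry : Nat) : Int) ((rx : Nat) : Int) = p2.set ry ((rx : Nat) : Int) := by
        rw [pvSetD_nrm N p2 _ _ hg2.1 (pvInRange_natCast N ry hrylt), pvNrm_natCast]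
      have hset := pvSet N p2 hg2 ry rx hrylt hrxlt hfixrx2 heq (Or.inl hrootry2)
      refine main _ (by rw [hsetD]; exact hset.1) (Or.inl ?_)
      intro i hi
      rw [hsetD]
      rw [hset.2 i hi, hr2' i hi, hrootry2]
    · rw [if_neg hrk]
      have hsetD : PySem.List.pySetD p2 ((rx : Nat) : Int) ((ry : Nat) : Int) = p2.set rx ((ry : Nat) : Int) := by
        rw [pvSetD_nrm N p2 _ _ hg2.1 (pvInRange_natCast N rx hrxlt), pvNrm_natCast]
      have hset := pvSet N p2 hg2 rx ry hrxlt hrylt hfixry2 (fun h => heq h.symm) (Or.inl hrootrx2)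
      have hg3 : pvGood N (PySem.List.pySetD p2 ((rx : Nat) : Int) ((ry : Nat) : Int)) := by
        rw [hsetD]; exact hset.1
      have hroots3 : ∀ i, i < N →
          pvRoot N (PySem.List.pySetD p2 ((rx : Nat) : Int) ((ry : Nat) : Int)) i =
            if pvRoot N p i = rx then ry else pvRoot N p i := by
        intro i hi
        rw [hsetD, hset.2 i hi, hr2' i hi, hrootrx2]
      by_cases hrk2 : PySem.List.pyGetD rank ((rx : Nat) : Int) 0 = PySem.List.pyGetD rank ((ry : Nat) : Int) 0
      · rw [if_pos hrk2]
        exact main _ hg3 (Or.inr hroots3)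
      · rw [if_neg hrk2]
        exact main _ hg3 (Or.inr hroots3)

-- ---------- sorted-edge prefix counting ----------

lemma pvCnt_le_len (edges : List (Int × Int × Int)) (L : Int) : pvCnt edges L ≤ edges.length :=
  List.countP_le_length

lemma pvCnt_anti (edges : List (Int × Int × Int)) (L L' : Int) (h : L' ≤ L) :
    pvCnt edges L ≤ pvCnt edges L' :=
  List.countP_mono_left (fun e _ he => by
    simp only [decide_eq_true_eq] at he ⊢
    omega)

lemma pvCnt_iff (L : Int) : ∀ (edges : List (Int × Int × Int)),
    edges.Pairwise (fun a b => b.1 ≤ a.1) → ∀ j, (hj : j < edges.length) →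
    (j < pvCnt edges L ↔ L ≤ edges[j].1) := by
  intro edges
  induction edges with
  | nil => intro _ j hj; exact absurd hj (by simp)
  | cons e es ih =>
    intro hdesc j hj
    have htail := (List.pairwise_cons.mp hdesc).2
    have hall := (List.pairwise_cons.mp hdesc).1
    by_cases hL : L ≤ e.1
    · have hcnt : pvCnt (e :: es) L = pvCnt es L + 1 := by
        unfold pvCnt
        rw [List.countP_cons]
        simp [hL]
      cases j with
      | zero => simpa [hcnt] using hL
      | succ j =>
        have hj' : j < es.length := by simpa using hj
        have := ih htail j hj'
        simp only [hcnt, List.getElem_cons_succ]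
        constructor
        · intro h
          exact this.mp (by omega)
        · intro h
          have := this.mpr h
          omega
    · have hzero : pvCnt (e :: es) L = 0 := by
        unfold pvCnt
        rw [List.countP_cons]
        simp only [decide_eq_true_eq]
        rw [List.countP_eq_zero.mpr]
        · simp [hL]
        · intro b hb
          simp only [decide_eq_true_eq]
          have := hall b hb
          omega
      rw [hzero]
      cases j with
      | zero => simpa using hL
      | succ j =>
        have hj' : j < es.length := by simpa using hj
        simp only [List.getElem_cons_succ]
        constructor
        · omega
        · intro h
          have := hall (es[j]) (List.getElem_mem hj')
          omega

-- ---------- the while loop ----------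

lemma pvCompSteps_take_succ (comp0 : List Int) (edges : List (Int × Int × Int)) (ptr : Nat)
    (e : Int × Int × Int) (he : edges[ptr]? = some e) :
    pvCompSteps comp0 (edges.take (ptr + 1)) =
      pvMergeB (pvCompSteps comp0 (edges.take ptr)) e.2.1 e.2.2 := by
  unfold pvCompSteps
  rw [List.take_succ, he]
  simp

lemma pvWhileA_ok (N : Nat) (edges : List (Int × Int × Int)) (comp0 : List Int) (minL L : Int)
    (hdesc : edges.Pairwise (fun a b => b.1 ≤ a.1))
    (HE : ∀ e ∈ edges, minL ≤ e.1 → PySem.Raise.InRange N e.2.1 ∧ PySem.Raise.InRange N e.2.2)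
    (hLm : minL ≤ L) :
    ∀ d ptr parent rank, pvCnt edges L - ptr = d → ptr ≤ pvCnt edges L →
    pvInv N parent (pvCompSteps comp0 (edges.take ptr)) →
    (pvWhileA edges L parent rank ptr).2.2 = pvCnt edges L ∧
    pvInv N (pvWhileA edges L parent rank ptr).1 (pvCompSteps comp0 (edges.take (pvCnt edges L))) := by
  intro d
  induction d with
  | zero =>
    intro ptr parent rank hd hle hinv
    have heq : ptr = pvCnt edges L := by omega
    have hstop : pvWhileA edges L parent rank ptr = (parent, rank, ptr) := by
      rw [pvWhileA]
      split
      · rfl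
      · rename_i e he
        have hplen : ptr < edges.length := (List.getElem?_eq_some_iff.mp he).1
        have hlt : edges[ptr].1 < L := by
          by_contra hc
          have := (pvCnt_iff L edges hdesc ptr hplen).mpr (by omega)
          omega
        have hee : edges[ptr] = e := (List.getElem?_eq_some_iff.mp he).2
        rw [if_neg (by rw [← hee]; omega)]
    rw [hstop, heq]
    exact ⟨rfl, by rw [← heq]; exact hinv⟩
  | succ d ih =>
    intro ptr parent rank hd hle hinv
    have hptr : ptr < pvCnt edges L := by omega
    have hplen : ptr < edges.length := by
      have := pvCnt_le_len edges L
      omega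
    have he : edges[ptr]? = some edges[ptr] := List.getElem?_eq_some_iff.mpr ⟨hplen, rfl⟩
    have hLe : L ≤ edges[ptr].1 := (pvCnt_iff L edges hdesc ptr hplen).mp hptr
    have hstep : pvWhileA edges L parent rank ptr =
        pvWhileA edges L (pvUnionA parent rank edges[ptr].2.1 edges[ptr].2.2).1
          (pvUnionA parent rank edges[ptr].2.1 edges[ptr].2.2).2 (ptr + 1) := by
      rw [pvWhileA]
      split
      · rename_i he2
        rw [he2] at he
        exact absurd he (by simp)
      · rename_i e he2
        have hee : edges[ptr] = e := (List.getElem?_eq_some_iff.mp he2).2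
        rw [if_pos (by rw [← hee]; exact hLe), ← hee]
    have hrange := HE edges[ptr] (List.getElem_mem hplen) (by omega)
    have hinv' := pvUnionA_ok N parent rank _ edges[ptr].2.1 edges[ptr].2.2 hinv hrange.1 hrange.2
    rw [← pvCompSteps_take_succ comp0 edges ptr edges[ptr] he] at hinv'
    rw [hstep]
    exact ih (ptr + 1) _ _ (by omega) (by omega) hinv'

-- ---------- writes into the answer array ----------

lemma pvWriteFold (len : Nat) (g : Nat → Option Bool) (bv : Int × Int × Int × Int → Option Bool) :
    ∀ (qwi : List (Int × Int × Int × Int)) (ans : List (Option Bool)), ans.length = len →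
    (∀ t ∈ qwi, ∃ k, k < len ∧ t.2.2.2 = ((k : Nat) : Int) ∧ bv t = g k) →
    (qwi.foldl (fun a t => PySem.List.pySetD a t.2.2.2 (bv t)) ans).length = len ∧
    ∀ j, j < len →
      (qwi.foldl (fun a t => PySem.List.pySetD a t.2.2.2 (bv t)) ans).getD j none =
        if ((j : Nat) : Int) ∈ qwi.map (fun t => t.2.2.2) then g j else ans.getD j none := by
  intro qwi
  induction qwi with
  | nil =>
    intro ans hlen _
    exact ⟨hlen, fun j hj => by simp⟩
  | cons t rest ih =>
    intro ans hlen hall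
    obtain ⟨k, hk, hkt, hbv⟩ := hall t List.mem_cons_self
    have hset : PySem.List.pySetD ans t.2.2.2 (bv t) = ans.set k (g k) := by
      rw [hkt, PySem.List.pySetD_natCast, hbv]
    have hlen' : (ans.set k (g k)).length = len := by simp [hlen]
    obtain ⟨ihlen, ihval⟩ := ih (ans.set k (g k)) hlen'
      (fun t' ht' => hall t' (List.mem_cons_of_mem _ ht'))
    constructor
    · simpa [List.foldl_cons, hset] using ihlen
    · intro j hj
      rw [List.foldl_cons, hset]
      rw [ihval j hj]
      by_cases hmem : ((j : Nat) : Int) ∈ rest.map (fun t => t.2.2.2)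
      · rw [if_pos hmem, if_pos (by simp [List.mem_cons]; right; simpa using hmem)]
      · rw [if_neg hmem]
        by_cases hjk : j = k
        · rw [if_pos (by
            rw [List.map_cons]
            exact List.mem_cons.mpr (Or.inl (by rw [hkt, hjk])))]
          subst hjk
          rw [List.getD_eq_getElem?_getD, List.getElem?_set_self (by omega)]
          rfl
        · rw [if_neg (by
            rw [List.map_cons]
            intro hmem2
            rcases List.mem_cons.mp hmem2 with h | h
            · rw [hkt] at h
              exact hjk (by exact_mod_cast h)
            · exact hmem h)]
          rw [List.getD_eq_getElem?_getD, List.getElem?_set_ne (fun h => hjk h.symm), ← List.getD_eq_getElem?_getD]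

-- ---------- B's snapshots ----------

lemma pvSnapsB_spec (minL : Int) : ∀ (edges : List (Int × Int × Int)) (comp : List Int),
    edges.Pairwise (fun a b => b.1 ≤ a.1) →
    ∀ k, k ≤ pvCnt edges minL →
    (pvSnapsB minL comp edges).getD k [] = pvCompSteps comp (edges.take k) := by
  intro edges
  induction edges with
  | nil =>
    intro comp _ k hk
    have : pvCnt ([] : List (Int × Int × Int)) minL = 0 := rfl
    have hk0 : k = 0 := by omega
    subst hk0
    rfl
  | cons e es ih =>
    intro comp hdesc k hk
    have htail := (List.pairwise_cons.mp hdesc).2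
    have hall := (List.pairwise_cons.mp hdesc).1
    by_cases hL : e.1 < minL
    · have hzero : pvCnt (e :: es) minL = 0 := by
        unfold pvCnt
        rw [List.countP_cons, List.countP_eq_zero.mpr]
        · simp
          omega
        · intro b hb
          simp only [decide_eq_true_eq]
          have := hall b hb
          omega
      rw [hzero] at hk
      have hk0 : k = 0 := by omega
      subst hk0
      unfold pvSnapsB
      rw [if_pos hL]
      rfl
    · have hcnt : pvCnt (e :: es) minL = pvCnt es minL + 1 := by
        unfold pvCnt
        rw [List.countP_cons]
        simp
        omega
      unfold pvSnapsB
      rw [if_neg hL]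
      cases k with
      | zero => rfl
      | succ k =>
        have hk' : k ≤ pvCnt es minL := by omega
        simp only [List.getD_cons_succ]
        rw [ih _ htail k hk']
        unfold pvCompSteps
        simp [List.take_succ_cons]

-- ---------- assembling A's query loop ----------

def pvBval (N : Nat) (edges : List (Int × Int × Int)) (comp0 : List Int)
    (t : Int × Int × Int × Int) : Bool :=
  decide ((pvCompSteps comp0 (edges.take (pvCnt edges t.1))).getD (pvNrm N t.2.1) 0
        = (pvCompSteps comp0 (edges.take (pvCnt edges t.1))).getD (pvNrm N t.2.2.1) 0)

lemma pvBeq_int (x y : Int) : (x == y) = decide (x = y) := by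
  by_cases h : x = y <;> simp [h]

lemma pvCompSteps_length (comp0 : List Int) : ∀ edges : List (Int × Int × Int),
    (pvCompSteps comp0 edges).length = comp0.length := by
  intro edges
  induction edges generalizing comp0 with
  | nil => rfl
  | cons e es ih =>
    unfold pvCompSteps at ih ⊢
    rw [List.foldl_cons, ih, pvMergeB_length]

lemma pvFoldA_ok (N : Nat) (edges : List (Int × Int × Int)) (comp0 : List Int) (minL : Int)
    (hdesc : edges.Pairwise (fun a b => b.1 ≤ a.1))
    (HE : ∀ e ∈ edges, minL ≤ e.1 → PySem.Raise.InRange N e.2.1 ∧ PySem.Raise.InRange N e.2.2) :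
    ∀ (qwi : List (Int × Int × Int × Int)),
    qwi.Pairwise (fun a b => b.1 ≤ a.1) →
    (∀ t ∈ qwi, PySem.Raise.InRange N t.2.1 ∧ PySem.Raise.InRange N t.2.2.1 ∧ minL ≤ t.1) →
    ∀ (parent rank : List Int) (ans : List (Option Bool)) (ptr : Nat),
    (∀ t ∈ qwi, ptr ≤ pvCnt edges t.1) →
    pvInv N parent (pvCompSteps comp0 (edges.take ptr)) →
    (qwi.foldl (fun st t =>
      let w := pvWhileA edges t.1 st.1.1 st.1.2 st.2.2
      let fp := pvFindA (w.1.length + 1) w.1 t.2.1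
      let fq := pvFindA (fp.2.length + 1) fp.2 t.2.2.1
      ((fq.2, w.2.1), PySem.List.pySetD st.2.1 t.2.2.2 (some (fp.1 == fq.1)), w.2.2))
      ((parent, rank), (ans, ptr))).2.1 =
    qwi.foldl (fun a t => PySem.List.pySetD a t.2.2.2 (some (pvBval N edges comp0 t))) ans := by
  intro qwi
  induction qwi with
  | nil => intro _ _ parent rank ans ptr _ _; rfl
  | cons t rest ih =>
    intro hq hins parent rank ans ptr hptr hinv
    have hqt := (List.pairwise_cons.mp hq).1
    have hqrest := (List.pairwise_cons.mp hq).2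
    obtain ⟨hinp, hinq, hminL⟩ := hins t List.mem_cons_self
    -- the while loop advances the pointer to cnt t.1
    obtain ⟨hw2, hwinv⟩ := pvWhileA_ok N edges comp0 minL t.1 hdesc HE hminL
      (pvCnt edges t.1 - ptr) ptr parent rank rfl (hptr t List.mem_cons_self) hinv
    set w := pvWhileA edges t.1 parent rank ptr with hw
    set Ck := pvCompSteps comp0 (edges.take (pvCnt edges t.1)) with hCk
    obtain ⟨hwgood, hCklen, hwrel⟩ := hwinv
    -- the two finds
    obtain ⟨hfp1, hfpg, hfpr⟩ := pvFindA_port N w.1 t.2.1 hwgood hinp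
    set fp := pvFindA (w.1.length + 1) w.1 t.2.1 with hfp
    obtain ⟨hfq1, hfqg, hfqr⟩ := pvFindA_port N fp.2 t.2.2.1 hfpg hinq
    set fq := pvFindA (fp.2.length + 1) fp.2 t.2.2.1 with hfq
    have hnp : pvNrm N t.2.1 < N := pvNrm_lt N _ hinp
    have hnq : pvNrm N t.2.2.1 < N := pvNrm_lt N _ hinq
    have hfq1' : fq.1 = ((pvRoot N w.1 (pvNrm N t.2.2.1) : Nat) : Int) := by
      rw [hfq1, hfpr _ hnq]
    -- the written boolean is B's label comparison
    have hval : (fp.1 == fq.1) = pvBval N edges comp0 t := by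
      rw [hfp1, hfq1', pvBeq_int]
      unfold pvBval
      rw [← hCk]
      have hiff := hwrel (pvNrm N t.2.1) (pvNrm N t.2.2.1) hnp hnq
      by_cases h : pvRoot N w.1 (pvNrm N t.2.1) = pvRoot N w.1 (pvNrm N t.2.2.1)
      · rw [decide_eq_true (by exact_mod_cast h), decide_eq_true (hiff.mp h)]
      · rw [decide_eq_false (by exact_mod_cast h), decide_eq_false (fun hc => h (hiff.mpr hc))]
    -- invariant for the remaining queries
    have hinv2 : pvInv N fq.2 Ck := by
      refine ⟨hfqg, hCklen, ?_⟩
      intro i j hi hj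
      rw [hfqr i hi, hfqr j hj, hfpr i hi, hfpr j hj]
      exact hwrel i j hi hj
    have hptr2 : ∀ t' ∈ rest, pvCnt edges t.1 ≤ pvCnt edges t'.1 := by
      intro t' ht'
      exact pvCnt_anti edges t.1 t'.1 (hqt t' ht')
    rw [List.foldl_cons, List.foldl_cons]
    have hiheq := ih hqrest (fun t' ht' => hins t' (List.mem_cons_of_mem _ ht'))
      fq.2 w.2.1 (PySem.List.pySetD ans t.2.2.2 (some (pvBval N edges comp0 t))) (pvCnt edges t.1)
      hptr2 (by rw [← hCk]; exact hinv2)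
    simp only [← hfp, ← hfq]
    rw [hval, hw2]
    exact hiheq

-- ---------- the initial state ----------

lemma pvInit_getD (n : Int) (i : Nat) (hi : i < n.toNat) :
    (PySem.List.pyRange 0 n 1).getD i 0 = (i : Int) := by
  rw [PySem.List.pyRange_one]
  rw [List.getD_eq_getElem _ 0 (by rw [List.length_map, List.length_range]; omega),
      List.getElem_map, List.getElem_range]
  omega

lemma pvInv_init (n : Int) : pvInv n.toNat (PySem.List.pyRange 0 n 1) (PySem.List.pyRange 0 n 1) := by
  have hlen : (PySem.List.pyRange 0 n 1).length = n.toNat := by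
    rw [PySem.List.pyRange_one]
    simp
  have hfix : ∀ i, i < n.toNat → pvStep (PySem.List.pyRange 0 n 1) i = i := by
    intro i hi
    unfold pvStep
    rw [pvInit_getD n i hi]
    omega
  have hgood : pvGood n.toNat (PySem.List.pyRange 0 n 1) := by
    refine ⟨hlen, ?_, ?_⟩
    · intro i hi
      rw [pvInit_getD n i hi]
      constructor
      · omega
      · rw [show pvStep (PySem.List.pyRange 0 n 1) i = i from hfix i hi]
        exact hi
    · intro i hi
      exact ⟨0, hfix i hi⟩
  refine ⟨hgood, hlen, ?_⟩
  intro i j hi hj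
  rw [pvRoot_of_fix _ _ hgood i hi (hfix i hi), pvRoot_of_fix _ _ hgood j hj (hfix j hj),
      pvInit_getD n i hi, pvInit_getD n j hj]
  constructor
  · intro h
    exact_mod_cast h
  · intro h
    exact_mod_cast h

theorem edgeLengthRestrictedPaths_spec : Claim_equal_edgeLengthRestrictedPaths := by
  intro n edgeList queries hdom hpre
  show edgeLengthRestrictedPaths n edgeList queries = edgeLengthRestrictedPaths_alt n edgeList queries
  rcases queries with _ | ⟨Q, QS⟩
  · rfl
  set queries := Q :: QS with hqdef
  -- the minimum query limit
  obtain ⟨m, hm⟩ : ∃ m, PySem.List.min? (queries.map (fun q => q.2.2)) (fun z => z) = some m := by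
    cases h : PySem.List.min? (queries.map (fun q => q.2.2)) (fun z => z) with
    | none =>
      have := (PySem.List.min?_eq_none_iff _ _).mp h
      simp [hqdef] at this
    | some m => exact ⟨m, rfl⟩
  obtain ⟨q0, hq0, hq0m⟩ := List.mem_map.mp (PySem.List.min?_mem hm)
  have hmins : ∀ q ∈ queries, m ≤ q.2.2 := fun q hq =>
    PySem.List.min?_isMin hm q.2.2 (List.mem_map.mpr ⟨q, hq, rfl⟩)
  set eMap := edgeList.map (fun e => (e.2.2, e.1, e.2.1)) with heMap
  set edges := PySem.List.sorted eMap (fun t => t.1) true with hedges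
  set qMap := (PySem.List.enumerate queries 0).map (fun t => (t.2.2.2, t.2.1, t.2.2.1, t.1)) with hqMap
  set qwi := PySem.List.sorted qMap (fun t => t.1) true with hqwi
  set comp0 := PySem.List.pyRange 0 n 1 with hcomp0
  set len := queries.length with hlen
  have hdesc : edges.Pairwise (fun a b => b.1 ≤ a.1) := PySem.List.sorted_pairwise_rev eMap _
  have hqdesc : qwi.Pairwise (fun (a b : Int × Int × Int × Int) => b.1 ≤ a.1) :=
    PySem.List.sorted_pairwise_rev qMap _
  have HE : ∀ e ∈ edges, m ≤ e.1 → PySem.Raise.InRange n.toNat e.2.1 ∧ PySem.Raise.InRange n.toNat e.2.2 := by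
    intro e he hme
    have hmm : e ∈ eMap := (PySem.List.mem_sorted eMap _ true e).mp he
    obtain ⟨u3, hu3, rfl⟩ := List.mem_map.mp hmm
    exact hpre.2 u3 hu3 ⟨q0, hq0, by rw [hq0m]; exact hme⟩
  -- every sorted query tuple comes from an enumerated query
  have hchar : ∀ t ∈ qwi, ∃ k, ∃ (hk : k < len),
      t = (queries[k].2.2, queries[k].1, queries[k].2.1, ((k : Nat) : Int)) := by
    intro t ht
    have : t ∈ qMap := (PySem.List.mem_sorted qMap _ true t).mp ht
    obtain ⟨p, hp, rfl⟩ := List.mem_map.mp this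
    obtain ⟨k, hk, rfl⟩ := (PySem.List.mem_enumerate_iff queries 0 p).mp hp
    exact ⟨k, hk, by simp⟩
  have hins : ∀ t ∈ qwi, PySem.Raise.InRange n.toNat t.2.1 ∧ PySem.Raise.InRange n.toNat t.2.2.1 ∧ m ≤ t.1 := by
    intro t ht
    obtain ⟨k, hk, rfl⟩ := hchar t ht
    have hq := hpre.1 queries[k] (List.getElem_mem hk)
    exact ⟨hq.1, hq.2, hmins queries[k] (List.getElem_mem hk)⟩
  have hinv0 : pvInv n.toNat comp0 (pvCompSteps comp0 (edges.take 0)) := by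
    rw [List.take_zero]
    exact pvInv_init n
  have hfold := pvFoldA_ok n.toNat edges comp0 m hdesc HE qwi hqdesc hins
    comp0 (List.replicate n.toNat 0) (List.replicate len (none : Option Bool)) 0
    (fun _ _ => Nat.zero_le _) hinv0
  -- the pure write-fold
  set g : Nat → Option Bool := fun k =>
    some (pvBval n.toNat edges comp0
      ((queries.getD k (0,0,0)).2.2, (queries.getD k (0,0,0)).1, (queries.getD k (0,0,0)).2.1, 0)) with hg
  have hwf := pvWriteFold len g (fun t => some (pvBval n.toNat edges comp0 t)) qwi
    (List.replicate len (none : Option Bool)) (by simp)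
    (by
      intro t ht
      obtain ⟨k, hk, rfl⟩ := hchar t ht
      refine ⟨k, hk, rfl, ?_⟩
      rw [hg]
      simp only [List.getD_eq_getElem queries (0,0,0) hk]
      rfl
    )
  -- index coverage
  have hcov : ∀ j, j < len → ((j : Nat) : Int) ∈ qwi.map (fun t => t.2.2.2) := by
    intro j hj
    have hperm : (qwi.map (fun t => t.2.2.2)).Perm (qMap.map (fun t => t.2.2.2)) :=
      (PySem.List.sorted_perm qMap _ true).map _
    have hqm : qMap.map (fun t : Int × Int × Int × Int => t.2.2.2) =
        (PySem.List.enumerate queries 0).map (fun t => t.1) := by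
      rw [hqMap, List.map_map]
      rfl
    rw [hperm.mem_iff, hqm, PySem.List.map_fst_enumerate, PySem.List.mem_pyRange_one]
    constructor
    · omega
    · simp [hlen]
      exact_mod_cast hj
  -- now compute both sides
  simp only [edgeLengthRestrictedPaths, edgeLengthRestrictedPaths_alt]
  rw [← hqMap, ← hqwi, ← heMap, ← hedges, ← hcomp0, ← hlen, hm]
  simp only [Option.getD_some]
  rw [hfold]
  apply List.ext_getElem
  · rw [List.length_map, hwf.1, List.length_map]
  · intro j hj1 hj2
    have hjlen : j < len := by
      rw [List.length_map, hwf.1] at hj1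
      exact hj1
    rw [List.getElem_map, List.getElem_map]
    have hv := hwf.2 j hjlen
    rw [if_pos (hcov j hjlen)] at hv
    have hgetE : (qwi.foldl (fun a t => PySem.List.pySetD a t.2.2.2
        (some (pvBval n.toNat edges comp0 t))) (List.replicate len (none : Option Bool)))[j] = g j := by
      rw [← hv, List.getD_eq_getElem _ none (by rw [hwf.1]; exact hjlen)]
    rw [hgetE]
    simp only [hg, Option.getD_some]
    -- B's per-query value
    have hq := hpre.1 queries[j] (List.getElem_mem hjlen)
    have hclen : (pvCompSteps comp0 (edges.take (pvCnt edges queries[j].2.2))).length = n.toNat := by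
      rw [pvCompSteps_length, hcomp0, PySem.List.pyRange_one]
      simp
    have hksum : ((edges.map (fun e => if queries[j].2.2 ≤ e.1 then (1 : Int) else 0)).sum)
        = ((pvCnt edges queries[j].2.2 : Nat) : Int) := by
      have hfeq : (fun e : Int × Int × Int => if queries[j].2.2 ≤ e.1 then (1 : Int) else 0)
          = (fun e : Int × Int × Int => if (fun e : Int × Int × Int => decide (queries[j].2.2 ≤ e.1)) e = true then (1 : Int) else 0) := by
        funext e
        by_cases h : queries[j].2.2 ≤ e.1 <;> simp [h]
      rw [hfeq, PySem.List.sum_map_ite_one_zero]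
      rfl
    have hsnap : PySem.List.pyGetD (pvSnapsB m comp0 edges) ((pvCnt edges queries[j].2.2 : Nat) : Int) []
        = pvCompSteps comp0 (edges.take (pvCnt edges queries[j].2.2)) := by
      rw [PySem.List.pyGetD_natCast]
      exact pvSnapsB_spec m edges comp0 hdesc _
        (pvCnt_anti edges queries[j].2.2 m (hmins queries[j] (List.getElem_mem hjlen)))
    rw [List.getD_eq_getElem queries (0,0,0) hjlen]
    rw [hksum, hsnap]
    set c := pvCompSteps comp0 (edges.take (pvCnt edges queries[j].2.2)) with hc
    rw [pvGetD_nrm n.toNat c queries[j].1 0 hclen hq.1,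
        pvGetD_nrm n.toNat c queries[j].2.1 0 hclen hq.2,
        pvBeq_int]
    rfl
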